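-- pv_equiv track=rewrite | github.com/Eloque/LumenCat | predefined.py | convert_into_vertices
-- ===== SOURCE A (Python) =====
-- def convert_into_vertices(edges):
--     if not edges:
--         return []
--
--     # Start with the first edge and add its starting vertex
--     path = [edges[0][:2]]  # Add the starting point of the first edge
--     current_point = edges[0][2:]  # The ending point of the first edge becomes the current point
--
--     # Remove the first edge from the list
--     remaining_edges = edges[1:]
--
--     while remaining_edges:
--         for i, edge in enumerate(remaining_edges):
--             if edge[:2] == current_point:  # If the start of the edge connects
--                 path.append(edge[:2])
--                 current_point = edge[2:]
--                 del remaining_edges[i]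
--                 break
--             elif edge[2:] == current_point:  # If the end of the edge connects (but is in reverse)
--                 path.append(edge[2:])
--                 current_point = edge[:2]
--                 del remaining_edges[i]
--                 break
--         else:
--             # No more connecting edges found
--             break
--
--     # Add the last point
--     path.append(current_point)
--
--     return path
-- ===== SOURCE B (Python) =====
-- def convert_into_vertices(edges):
--     if not edges:
--         return []
--     # Index every remaining edge once by each endpoint, so each step consults
--     # only the candidate edges sharing the current endpoint instead of scanning
--     # all remaining edges.
--     by_start = {}
--     by_end = {}
--     for i, e in enumerate(edges[1:], 1):
--         a, b = e[:2], e[2:]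
--         by_start.setdefault(tuple(a), []).append((i, b))
--         by_end.setdefault(tuple(b), []).append((i, a))
--     used = set()
--     path = [edges[0][:2]]
--     cp = edges[0][2:]
--     while True:
--         cs = next((c for c in by_start.get(tuple(cp), []) if c[0] not in used), None)
--         ce = next((c for c in by_end.get(tuple(cp), []) if c[0] not in used), None)
--         if cs is not None and (ce is None or cs[0] <= ce[0]):
--             used.add(cs[0])
--             path.append(cp)
--             cp = cs[1]
--         elif ce is not None:
--             used.add(ce[0])
--             path.append(cp)
--             cp = ce[1]
--         else:
--             break
--     path.append(cp)
--     return path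
-- ===== Notes on version B (the rewrite author's own statement) =====
-- stated objective: alternative
-- what changed: Replaces A's per-step linear scan (with in-place deletion) of the remaining edges by two endpoint-keyed dictionaries built once over enumerate(edges[1:], 1) plus a used-index set; each step looks up only the candidate edges sharing the current endpoint and takes the lowest-index unused one, preferring a start-match on ties.
import Mathlib
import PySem

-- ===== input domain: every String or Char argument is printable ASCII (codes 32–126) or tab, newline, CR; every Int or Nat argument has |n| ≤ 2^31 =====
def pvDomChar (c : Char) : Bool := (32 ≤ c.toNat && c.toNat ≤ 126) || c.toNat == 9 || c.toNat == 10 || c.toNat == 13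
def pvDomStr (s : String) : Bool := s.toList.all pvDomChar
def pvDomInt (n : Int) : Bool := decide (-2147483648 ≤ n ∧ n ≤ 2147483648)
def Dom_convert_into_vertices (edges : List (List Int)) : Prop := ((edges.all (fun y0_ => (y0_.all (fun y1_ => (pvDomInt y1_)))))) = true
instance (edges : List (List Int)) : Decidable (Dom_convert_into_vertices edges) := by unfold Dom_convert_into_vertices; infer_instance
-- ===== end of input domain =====

-- B replaces A's per-step linear scan (with in-place deletion) of the remaining edges
-- by two endpoint-keyed dictionaries built once plus a used-index set, picking the
-- lowest-index unused connecting edge per step (objective: alternative algorithm).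

-- ===== PORT A =====
-- the for/else body: scan remaining_edges for the first connecting edge;
-- returns (appended vertex, new current_point, remaining_edges after the del), or none
def pvScanA (cp : List Int) : List (List Int) → Option (List Int × List Int × List (List Int))
  | [] => none
  | e :: rest =>
    if PySem.List.slice e none (some 2) = cp then
      some (PySem.List.slice e none (some 2), PySem.List.slice e (some 2) none, rest)
    else if PySem.List.slice e (some 2) none = cp then
      some (PySem.List.slice e (some 2) none, PySem.List.slice e none (some 2), rest)
    else
      match pvScanA cp rest with
      | none => none
      | some (v, c, r) => some (v, c, e :: r)

theorem pvScanA_length (cp : List Int) (rem : List (List Int)) :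
    ∀ v c r, pvScanA cp rem = some (v, c, r) → r.length < rem.length := by
  induction rem with
  | nil => intro v c r h; simp [pvScanA] at h
  | cons e rest ih =>
    intro v c r h
    simp only [pvScanA] at h
    split_ifs at h
    · simp only [Option.some.injEq, Prod.mk.injEq] at h
      obtain ⟨-, -, hr⟩ := h; subst hr; simp
    · simp only [Option.some.injEq, Prod.mk.injEq] at h
      obtain ⟨-, -, hr⟩ := h; subst hr; simp
    · cases hrec : pvScanA cp rest with
      | none => rw [hrec] at h; simp at h
      | some t =>
        obtain ⟨v', c', r'⟩ := t
        rw [hrec] at h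
        simp only [Option.some.injEq, Prod.mk.injEq] at h
        obtain ⟨-, -, hr⟩ := h; subst hr
        have := ih v' c' r' hrec
        simp; omega

-- the while loop
def pvLoopA (path : List (List Int)) (cp : List Int) (rem : List (List Int)) :
    List (List Int) × List Int :=
  match h : pvScanA cp rem with
  | none => (path, cp)
  | some (v, c, r) => pvLoopA (path ++ [v]) c r
termination_by rem.length
decreasing_by exact pvScanA_length cp rem v c r h

def convert_into_vertices (edges : List (List Int)) : List (List Int) :=
  match edges with
  | [] => []
  | e0 :: _ =>
    let path := [PySem.List.slice e0 none (some 2)]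
    let cp := PySem.List.slice e0 (some 2) none
    let rem := PySem.List.slice edges (some 1) none
    let pc := pvLoopA path cp rem
    pc.1 ++ [pc.2]

-- ===== PORT B =====
-- build the two endpoint indexes: by_start maps e[:2] to the list of (index, e[2:]),
-- by_end maps e[2:] to the list of (index, e[:2]), over enumerate(edges[1:], 1)
def pvBuildB (tail : List (List Int)) :
    PySem.Dict (List Int) (List (Int × List Int)) × PySem.Dict (List Int) (List (Int × List Int)) :=
  (PySem.List.enumerate tail 1).foldl
    (fun d p =>
      (d.1.modify (PySem.List.slice p.2 none (some 2)) []
          (· ++ [(p.1, PySem.List.slice p.2 (some 2) none)]),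
       d.2.modify (PySem.List.slice p.2 (some 2) none) []
          (· ++ [(p.1, PySem.List.slice p.2 none (some 2))])))
    (PySem.Dict.empty, PySem.Dict.empty)

-- next((c for c in l if c[0] not in used), None)
def pvNextUnused (used : PySem.Set Int) (l : List (Int × List Int)) : Option (Int × List Int) :=
  l.find? (fun c => !PySem.Set.contains used c.1)

-- the while True loop; fuel = len(edges) always suffices (each step consumes one index)
def pvLoopB (bs be : PySem.Dict (List Int) (List (Int × List Int))) :
    Nat → PySem.Set Int → List (List Int) → List Int → List (List Int) × List Int
  | 0, _, path, cp => (path, cp)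
  | fuel + 1, used, path, cp =>
    match pvNextUnused used (bs.getD cp []), pvNextUnused used (be.getD cp []) with
    | some c, none => pvLoopB bs be fuel (PySem.Set.add used c.1) (path ++ [cp]) c.2
    | some c, some c' =>
      if c.1 ≤ c'.1 then pvLoopB bs be fuel (PySem.Set.add used c.1) (path ++ [cp]) c.2
      else pvLoopB bs be fuel (PySem.Set.add used c'.1) (path ++ [cp]) c'.2
    | none, some c' => pvLoopB bs be fuel (PySem.Set.add used c'.1) (path ++ [cp]) c'.2
    | none, none => (path, cp)

def convert_into_vertices_alt (edges : List (List Int)) : List (List Int) :=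
  match edges with
  | [] => []
  | e0 :: tail =>
    let d := pvBuildB tail
    let pc := pvLoopB d.1 d.2 edges.length PySem.Set.empty
      [PySem.List.slice e0 none (some 2)] (PySem.List.slice e0 (some 2) none)
    pc.1 ++ [pc.2]

-- ===== PRECONDITION & SPEC =====
def Spec_convert_into_vertices (edges : List (List Int)) (out : List (List Int)) : Prop := out = convert_into_vertices_alt edges
instance (edges : List (List Int)) (out : List (List Int)) : Decidable (Spec_convert_into_vertices edges out) := by unfold Spec_convert_into_vertices; infer_instance

-- ===== CLAIM (what is proved, stated in full; the proofs are below) =====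
def Claim_equal_convert_into_vertices : Prop := ∀ (edges : List (List Int)), Dom_convert_into_vertices edges → Spec_convert_into_vertices edges (convert_into_vertices edges)

-- ===== LEMMAS AND PROOFS =====

-- proof-side abbreviations: the two slices e[:2] and e[2:]
def pvS2 (e : List Int) : List Int := PySem.List.slice e none (some 2)
def pvF2 (e : List Int) : List Int := PySem.List.slice e (some 2) none

-- the edge B's step selects from the indexed remaining list R, tagged with
-- whether it connects by its start (true) or its end (false)
def pvSel (cp : List Int) (R : List (Int × List Int)) : Option ((Int × List Int) × Bool) :=
  match R.find? (fun p => pvS2 p.2 == cp), R.find? (fun p => pvF2 p.2 == cp) with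
  | none, none => none
  | some c, none => some (c, true)
  | none, some c => some (c, false)
  | some c, some c' => if c.1 ≤ c'.1 then some (c, true) else some (c', false)

theorem pvSel_mem (cp : List Int) (R : List (Int × List Int)) (cb : (Int × List Int) × Bool)
    (h : pvSel cp R = some cb) : cb.1 ∈ R := by
  unfold pvSel at h
  cases hs : R.find? (fun p => pvS2 p.2 == cp) with
  | none =>
    cases he : R.find? (fun p => pvF2 p.2 == cp) with
    | none => rw [hs, he] at h; simp at h
    | some c =>
      rw [hs, he] at h; simp at h; subst h
      exact List.mem_of_find?_eq_some he
  | some c =>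
    cases he : R.find? (fun p => pvF2 p.2 == cp) with
    | none =>
      rw [hs, he] at h; simp at h; subst h
      exact List.mem_of_find?_eq_some hs
    | some c' =>
      rw [hs, he] at h
      dsimp only at h
      split_ifs at h <;> simp at h <;> subst h
      · exact List.mem_of_find?_eq_some hs
      · exact List.mem_of_find?_eq_some he

-- A's scan of the remaining edges picks exactly the edge B's rule selects,
-- appends the current point, and deletes that edge
theorem pvScanA_eq_sel (cp : List Int) (R : List (Int × List Int))
    (hR : R.Pairwise (fun p q => p.1 < q.1)) :
    pvScanA cp (R.map (·.2)) =
      (pvSel cp R).map (fun cb =>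
        (cp, (if cb.2 then pvF2 cb.1.2 else pvS2 cb.1.2),
         (R.filter (fun p => !(p.1 == cb.1.1))).map (·.2))) := by
  induction R with
  | nil => simp [pvScanA, pvSel]
  | cons p R' ih =>
    have hlt : ∀ q ∈ R', p.1 < q.1 := (List.pairwise_cons.mp hR).1
    have hR' : R'.Pairwise (fun p q => p.1 < q.1) := (List.pairwise_cons.mp hR).2
    have hfilt : R'.filter (fun q => !(q.1 == p.1)) = R' :=
      List.filter_eq_self.mpr (fun q hq => by simp; exact fun h => absurd h (by have := hlt q hq; omega))
    by_cases hs : pvS2 p.2 = cp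
    · -- the head connects by its start: both take it
      have hsel : pvSel cp (p :: R') = some (p, true) := by
        unfold pvSel
        rw [List.find?_cons_of_pos (by simp [hs])]
        cases he : (p :: R').find? (fun q => pvF2 q.2 == cp) with
        | none => rfl
        | some c' =>
          have hc' : c' ∈ p :: R' := List.mem_of_find?_eq_some he
          have hle : p.1 ≤ c'.1 := by
            rcases List.mem_cons.mp hc' with h | h
            · rw [h]
            · have := hlt c' h; omega
          dsimp only
          rw [if_pos hle]
      rw [hsel]
      simp only [pvScanA, List.map_cons]
      rw [if_pos (by simpa [pvS2] using hs)]
      simp only [Option.map_some]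
      have : (p :: R').filter (fun q => !(q.1 == p.1)) = R' := by
        rw [List.filter_cons_of_neg (by simp)]; exact hfilt
      rw [this]
      simp [pvS2, pvF2] at hs ⊢
      simp [hs]
    · by_cases he : pvF2 p.2 = cp
      · -- the head connects by its end only
        have hsel : pvSel cp (p :: R') = some (p, false) := by
          unfold pvSel
          rw [List.find?_cons_of_neg (by simp [hs]),
              List.find?_cons_of_pos (by simp [he])]
          cases hcs : R'.find? (fun q => pvS2 q.2 == cp) with
          | none => rfl
          | some c =>
            have hc : c ∈ R' := List.mem_of_find?_eq_some hcs
            have hle : ¬ c.1 ≤ p.1 := by have := hlt c hc; omega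
            dsimp only
            rw [if_neg hle]
        rw [hsel]
        simp only [pvScanA, List.map_cons]
        rw [if_neg (by simpa [pvS2] using hs), if_pos (by simpa [pvF2] using he)]
        simp only [Option.map_some]
        have : (p :: R').filter (fun q => !(q.1 == p.1)) = R' := by
          rw [List.filter_cons_of_neg (by simp)]; exact hfilt
        rw [this]
        simp [pvS2, pvF2] at he ⊢
        simp [he]
      · -- the head does not connect: skip it on both sides
        have hsel : pvSel cp (p :: R') = pvSel cp R' := by
          unfold pvSel
          rw [List.find?_cons_of_neg (by simp [hs]), List.find?_cons_of_neg (by simp [he])]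
        rw [hsel]
        simp only [pvScanA, List.map_cons]
        rw [if_neg (by simpa [pvS2] using hs), if_neg (by simpa [pvF2] using he)]
        rw [ih hR']
        cases hsel' : pvSel cp R' with
        | none => simp
        | some cb =>
          have hmem : cb.1 ∈ R' := pvSel_mem cp R' cb hsel'
          have hne : ¬ (p.1 == cb.1.1) = true := by
            simp; have := hlt cb.1 hmem; omega
          simp only [Option.map_some]
          rw [List.filter_cons_of_pos (by simpa using hne)]
          simp

-- unfolding lemmas for the while loops
theorem pvLoopA_none (path : List (List Int)) (cp : List Int) (rem : List (List Int))
    (h : pvScanA cp rem = none) : pvLoopA path cp rem = (path, cp) := by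
  rw [pvLoopA]; split <;> simp_all

theorem pvLoopA_some (path : List (List Int)) (cp v c : List Int) (rem r : List (List Int))
    (h : pvScanA cp rem = some (v, c, r)) :
    pvLoopA path cp rem = pvLoopA (path ++ [v]) c r := by
  rw [pvLoopA]; split <;> simp_all

-- dictionary lookups in the built indexes are filters of the enumerated tail
theorem pvGetD_fold {α β : Type} (l : List α) (key : α → List Int) (val : α → β)
    (d : PySem.Dict (List Int) (List β)) (c : List Int) :
    (l.foldl (fun d x => d.modify (key x) [] (· ++ [val x])) d).getD c []
      = d.getD c [] ++ (l.filter (fun x => key x == c)).map val := by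
  induction l generalizing d with
  | nil => simp
  | cons x l ih =>
    simp only [List.foldl_cons]
    rw [ih]
    rw [PySem.Dict.getD_modify]
    by_cases hk : c = key x
    · rw [if_pos hk, List.filter_cons_of_pos (by simp [hk])]
      simp [hk]
    · rw [if_neg hk, List.filter_cons_of_neg (by simp; exact fun h => absurd h.symm hk)]

theorem pvPairFold_fst {α β γ : Type} (l : List α) (f : β → α → β) (g : γ → α → γ)
    (b : β) (c : γ) : (l.foldl (fun d p => (f d.1 p, g d.2 p)) (b, c)) = (l.foldl f b, l.foldl g c) := by
  induction l generalizing b c with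
  | nil => rfl
  | cons x l ih => simp only [List.foldl_cons]; exact ih (f b x) (g c x)

theorem pvBuild_eq (tail : List (List Int)) :
    pvBuildB tail =
      ((PySem.List.enumerate tail 1).foldl
        (fun d p => d.modify (PySem.List.slice p.2 none (some 2)) []
            (· ++ [(p.1, PySem.List.slice p.2 (some 2) none)])) PySem.Dict.empty,
       (PySem.List.enumerate tail 1).foldl
        (fun d p => d.modify (PySem.List.slice p.2 (some 2) none) []
            (· ++ [(p.1, PySem.List.slice p.2 none (some 2))])) PySem.Dict.empty) := by
  unfold pvBuildB
  exact pvPairFold_fst (PySem.List.enumerate tail 1)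
    (fun d p => d.modify (PySem.List.slice p.2 none (some 2)) []
        (· ++ [(p.1, PySem.List.slice p.2 (some 2) none)]))
    (fun d p => d.modify (PySem.List.slice p.2 (some 2) none) []
        (· ++ [(p.1, PySem.List.slice p.2 none (some 2))]))
    PySem.Dict.empty PySem.Dict.empty

theorem pvBS_getD (tail : List (List Int)) (cp : List Int) :
    ((pvBuildB tail).1).getD cp []
      = ((PySem.List.enumerate tail 1).filter (fun p => pvS2 p.2 == cp)).map
          (fun p => (p.1, pvF2 p.2)) := by
  rw [pvBuild_eq]
  dsimp only
  rw [pvGetD_fold (PySem.List.enumerate tail 1)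
      (fun p => PySem.List.slice p.2 none (some 2))
      (fun p => (p.1, PySem.List.slice p.2 (some 2) none))]
  simp [PySem.Dict.getD_empty, pvS2, pvF2]

theorem pvBE_getD (tail : List (List Int)) (cp : List Int) :
    ((pvBuildB tail).2).getD cp []
      = ((PySem.List.enumerate tail 1).filter (fun p => pvF2 p.2 == cp)).map
          (fun p => (p.1, pvS2 p.2)) := by
  rw [pvBuild_eq]
  dsimp only
  rw [pvGetD_fold (PySem.List.enumerate tail 1)
      (fun p => PySem.List.slice p.2 (some 2) none)
      (fun p => (p.1, PySem.List.slice p.2 none (some 2)))]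
  simp [PySem.Dict.getD_empty, pvS2, pvF2]

theorem pvContains_add (s : PySem.Set Int) (x y : Int) :
    PySem.Set.contains (PySem.Set.add s y) x = (x == y || PySem.Set.contains s x) := by
  simp only [PySem.Set.add, PySem.Set.contains]
  split
  · rename_i hy
    simp only [List.contains_eq_mem, decide_eq_true_eq] at hy
    by_cases hxy : x = y <;> simp [hxy, hy]
  · by_cases hxy : x = y <;> simp [hxy]

-- find? through two independent filters commutes
theorem pvFind_filter_comm {α : Type} (l : List α) (p q : α → Bool) :
    (l.filter q).find? p = (l.filter p).find? q := by
  induction l with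
  | nil => rfl
  | cons x l ih =>
    by_cases hp : p x <;> by_cases hq : q x <;>
      simp [hp, hq, ih]

-- B's candidate from a built index = find? over the unused remaining list R
theorem pvCand_eq (used : PySem.Set Int) (T : List (Int × List Int))
    (keyf valf : List Int → List Int) (cp : List Int) :
    pvNextUnused used ((T.filter (fun p => keyf p.2 == cp)).map (fun p => (p.1, valf p.2)))
      = ((T.filter (fun p => !PySem.Set.contains used p.1)).find?
          (fun p => keyf p.2 == cp)).map (fun p => (p.1, valf p.2)) := by
  unfold pvNextUnused
  rw [List.find?_map]
  show ((T.filter (fun p => keyf p.2 == cp)).find? (fun p => !PySem.Set.contains used p.1)).map _ = _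
  rw [pvFind_filter_comm]

-- the main simulation: A's while loop over the remaining list equals B's
-- while loop over the indexes with the used set, where R is the unused part
theorem pvLoop_eq (tail : List (List Int)) (fuel : Nat) :
    ∀ (used : PySem.Set Int) (path : List (List Int)) (cp : List Int)
      (R : List (Int × List Int)),
      R = (PySem.List.enumerate tail 1).filter (fun p => !PySem.Set.contains used p.1) →
      R.length < fuel →
      pvLoopA path cp (R.map (·.2)) = pvLoopB (pvBuildB tail).1 (pvBuildB tail).2 fuel used path cp := by
  induction fuel with
  | zero => intro _ _ _ _ _ hlen; omega
  | succ fuel ih =>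
    intro used path cp R hRdef hlen
    have hR : R.Pairwise (fun p q => p.1 < q.1) := by
      rw [hRdef]
      exact List.Pairwise.sublist (List.filter_sublist) (PySem.List.pairwise_lt_enumerate tail 1)
    -- the candidate computation on B's side
    have hcs : pvNextUnused used ((pvBuildB tail).1.getD cp [])
        = (R.find? (fun p => pvS2 p.2 == cp)).map (fun p => (p.1, pvF2 p.2)) := by
      rw [pvBS_getD, pvCand_eq, ← hRdef]
    have hce : pvNextUnused used ((pvBuildB tail).2.getD cp [])
        = (R.find? (fun p => pvF2 p.2 == cp)).map (fun p => (p.1, pvS2 p.2)) := by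
      rw [pvBE_getD, pvCand_eq, ← hRdef]
    -- the invariant after consuming index i
    have hstep : ∀ i : Int,
        R.filter (fun p => !(p.1 == i))
          = (PySem.List.enumerate tail 1).filter
              (fun p => !PySem.Set.contains (PySem.Set.add used i) p.1) := by
      intro i
      rw [hRdef, List.filter_filter]
      apply List.filter_congr
      intro p _
      rw [pvContains_add]
      by_cases h1 : p.1 = i <;> by_cases h2 : PySem.Set.contains used p.1 <;> simp [h1]
    have hlenstep : ∀ cb, pvSel cp R = some cb →
        (R.filter (fun p => !(p.1 == cb.1.1))).length < fuel := by
      intro cb hsel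
      have hmem := pvSel_mem cp R cb hsel
      have : (R.filter (fun p => !(p.1 == cb.1.1))).length < R.length :=
        List.length_filter_lt_length_iff_exists.mpr ⟨cb.1, hmem, by simp⟩
      omega
    rw [pvLoopB, hcs, hce]
    cases hfs : R.find? (fun p => pvS2 p.2 == cp) with
    | none =>
      cases hfe : R.find? (fun p => pvF2 p.2 == cp) with
      | none =>
        apply pvLoopA_none
        rw [pvScanA_eq_sel cp R hR]
        unfold pvSel; rw [hfs, hfe]; rfl
      | some c' =>
        have hsel : pvSel cp R = some (c', false) := by unfold pvSel; rw [hfs, hfe]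
        simp only [Option.map_some, Option.map_none]
        rw [pvLoopA_some path cp cp (pvS2 c'.2) _ ((R.filter (fun p => !(p.1 == c'.1))).map (·.2))
          (by rw [pvScanA_eq_sel cp R hR, hsel]; rfl)]
        exact ih _ _ _ _ (hstep c'.1) (hlenstep (c', false) hsel)
    | some c =>
      cases hfe : R.find? (fun p => pvF2 p.2 == cp) with
      | none =>
        have hsel : pvSel cp R = some (c, true) := by unfold pvSel; rw [hfs, hfe]
        simp only [Option.map_some, Option.map_none]
        rw [pvLoopA_some path cp cp (pvF2 c.2) _ ((R.filter (fun p => !(p.1 == c.1))).map (·.2))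
          (by rw [pvScanA_eq_sel cp R hR, hsel]; rfl)]
        exact ih _ _ _ _ (hstep c.1) (hlenstep (c, true) hsel)
      | some c' =>
        simp only [Option.map_some]
        by_cases hle : c.1 ≤ c'.1
        · have hsel : pvSel cp R = some (c, true) := by
            unfold pvSel; rw [hfs, hfe]; simp [hle]
          rw [if_pos hle]
          rw [pvLoopA_some path cp cp (pvF2 c.2) _ ((R.filter (fun p => !(p.1 == c.1))).map (·.2))
            (by rw [pvScanA_eq_sel cp R hR, hsel]; rfl)]
          exact ih _ _ _ _ (hstep c.1) (hlenstep (c, true) hsel)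
        · have hsel : pvSel cp R = some (c', false) := by
            unfold pvSel; rw [hfs, hfe]; simp [hle]
          rw [if_neg hle]
          rw [pvLoopA_some path cp cp (pvS2 c'.2) _ ((R.filter (fun p => !(p.1 == c'.1))).map (·.2))
            (by rw [pvScanA_eq_sel cp R hR, hsel]; rfl)]
          exact ih _ _ _ _ (hstep c'.1) (hlenstep (c', false) hsel)


-- ===== VERDICT (by name: the statement is the Claim_ definition above) =====
theorem convert_into_vertices_spec : Claim_equal_convert_into_vertices := by
  intro edges _
  unfold Spec_convert_into_vertices convert_into_vertices convert_into_vertices_alt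
  cases edges with
  | nil => rfl
  | cons e0 tail =>
    simp only []
    have hT : ((PySem.List.enumerate tail 1).filter
        (fun p => !PySem.Set.contains PySem.Set.empty p.1)) = PySem.List.enumerate tail 1 :=
      List.filter_eq_self.mpr (fun p _ => by simp [PySem.Set.contains, PySem.Set.empty])
    have := pvLoop_eq tail (e0 :: tail).length PySem.Set.empty
      [PySem.List.slice e0 none (some 2)] (PySem.List.slice e0 (some 2) none)
      (PySem.List.enumerate tail 1) hT.symm
      (by simp [PySem.List.length_enumerate])
    rw [PySem.List.map_snd_enumerate] at this
    rw [PySem.List.slice_from_one]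
    simp only [List.tail_cons]
    rw [this]
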